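-- pv_equiv track=rewrite | github.com/mrakhgari/SpaceWreck | Main.py | print_node_alpha
-- ===== SOURCE A (Python) =====
-- import string
--
-- def print_node_alpha(num, s):
--     out = ""
--     if num == s+1:
--         return 'end'
--     for _ in range(int((num-1)/26)+1):
--         out = out+list(string.ascii_uppercase)[(num-1) % 26]
--         num = num-26
--     return out
-- ===== SOURCE B (Python) =====
-- import string
--
-- def print_node_alpha(num, s):
--     if num == s + 1:
--         return 'end'
--     letter = string.ascii_uppercase[(num - 1) % 26]
--     count = int((num - 1) / 26) + 1
--     return letter * count
-- ===== Notes on version B (the rewrite author's own statement) =====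
-- stated objective: simpler
-- what changed: Replaced the character-appending loop (which decrements num by 26 each pass, leaving the letter unchanged mod 26) by a closed form: compute the letter and the repeat count once and return letter * count.
import Mathlib
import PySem

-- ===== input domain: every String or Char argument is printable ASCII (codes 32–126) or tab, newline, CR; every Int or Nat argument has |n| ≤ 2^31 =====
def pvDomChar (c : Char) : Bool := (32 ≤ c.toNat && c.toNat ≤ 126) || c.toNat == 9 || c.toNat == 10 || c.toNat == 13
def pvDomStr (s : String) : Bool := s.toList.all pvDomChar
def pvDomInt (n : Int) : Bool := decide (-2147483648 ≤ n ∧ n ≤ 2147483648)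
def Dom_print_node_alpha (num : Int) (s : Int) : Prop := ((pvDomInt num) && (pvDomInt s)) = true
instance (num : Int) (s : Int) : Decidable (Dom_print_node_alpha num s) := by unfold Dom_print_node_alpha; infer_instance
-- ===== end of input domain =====

-- B replaces A's append-one-letter-per-iteration loop by a closed form (letter and repeat
-- count computed once); equivalence of return values is proved on the whole domain.

-- string.ascii_uppercase as a list of characters
def pvUpper : List Char :=
  ['A','B','C','D','E','F','G','H','I','J','K','L','M',
   'N','O','P','Q','R','S','T','U','V','W','X','Y','Z']

-- ===== PORT A =====
-- Python's int((num-1)/26): float division then truncation toward zero.  For |num| ≤ 2^31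
-- the double division is exact enough that int() equals truncating integer division,
-- which is Lean's Int.div (`/`).  list(...)[(num-1) % 26]: the index is Python's mod,
-- always in [0,26), so the getD default is never used (exact).
def pvLoopA : Nat → String → Int → String
  | 0, out, _ => out
  | k + 1, out, num =>
      pvLoopA k (out.push (pvUpper.getD ((PySem.Int.mod (num - 1) 26).toNat) 'A')) (num - 26)

def print_node_alpha (num : Int) (s : Int) : String :=
  let out := ""
  if num = s + 1 then "end"
  else pvLoopA ((Int.tdiv (num - 1) 26 + 1).toNat) out num

-- ===== PORT B =====
def print_node_alpha_alt (num : Int) (s : Int) : String :=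
  if num = s + 1 then "end"
  else
    let letter := pvUpper.getD ((PySem.Int.mod (num - 1) 26).toNat) 'A'
    let count := Int.tdiv (num - 1) 26 + 1
    String.ofList (List.replicate count.toNat letter)

-- ===== PRECONDITION & SPEC =====
def Spec_print_node_alpha (num : Int) (s : Int) (out : String) : Prop := out = print_node_alpha_alt num s
instance (num : Int) (s : Int) (out : String) : Decidable (Spec_print_node_alpha num s out) := by unfold Spec_print_node_alpha; infer_instance

-- ===== CLAIM (what is proved, stated in full; the proofs are below) =====
def Claim_equal_print_node_alpha : Prop := ∀ (num : Int) (s : Int), Dom_print_node_alpha num s → Spec_print_node_alpha num s (print_node_alpha num s)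

-- ===== LEMMAS AND PROOFS =====

-- the letter is invariant under num ↦ num - 26
theorem pvLetter_sub26 (num : Int) :
    PySem.Int.mod (num - 26 - 1) 26 = PySem.Int.mod (num - 1) 26 := by
  simp [PySem.Int.mod, Int.fmod_eq_emod]
  omega

theorem pvLoopA_replicate (k : Nat) (out : String) (num : Int) :
    pvLoopA k out num =
      out ++ String.ofList (List.replicate k (pvUpper.getD ((PySem.Int.mod (num - 1) 26).toNat) 'A')) := by
  induction k generalizing out num with
  | zero =>
      apply String.ext
      simp [pvLoopA]
  | succ k ih =>
      rw [pvLoopA, ih, pvLetter_sub26]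
      apply String.ext
      simp [List.replicate_succ]

-- ===== VERDICT (by name: the statement is the Claim_ definition above) =====
theorem print_node_alpha_spec : Claim_equal_print_node_alpha := by
  intro num s _
  unfold Spec_print_node_alpha print_node_alpha print_node_alpha_alt
  by_cases h : num = s + 1
  · simp [h]
  · simp only [h, if_false]
    rw [pvLoopA_replicate]
    simp
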